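-- pv_equiv track=rewrite | github.com/ewigspace1910/UETNCKH-projects | Educhatbot/Modules/extentions/automarker_processor.py | _remove_tag_from_answer_text
-- ===== SOURCE A (Python) =====
-- def _remove_tag_from_answer_text(answer_text: str, tag: str) -> str:
--     while tag in answer_text:
--         index = answer_text.find(tag)
--         text_begin = answer_text[:index]
--         text_middle = ""
--         text_back = ""
--         text_temp = answer_text[index + 6:]
--
--         level = 0
--         for char in text_temp:
--             if level < 0:
--                 text_back = text_back + char
--             else:
--                 if char == "{":
--                     level += 1
--                 elif char == "}":
--                     level -= 1
--
--                 if level >= 0: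
--                     text_middle = text_middle + char
--
--         answer_text = text_begin + text_middle + text_back
--
--     return answer_text
-- ===== SOURCE B (Python) =====
-- def _remove_tag_from_answer_text(answer_text: str, tag: str) -> str:
--     # Same result as A, but each removal is done with an index scan for the
--     # first unmatched '}' plus three slices, instead of rebuilding the string
--     # one character at a time.
--     while True:
--         i = answer_text.find(tag)
--         if i < 0:
--             return answer_text
--         rest = answer_text[i + 6:]
--         level = 0
--         j = 0
--         n = len(rest)
--         while j < n:
--             c = rest[j]
--             if c == "{":
--                 level += 1
--             elif c == "}":
--                 level -= 1
--                 if level < 0: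
--                     break
--             j += 1
--         if j < n:
--             answer_text = answer_text[:i] + rest[:j] + rest[j + 1:]
--         else:
--             answer_text = answer_text[:i] + rest
-- ===== Notes on version B (the rewrite author's own statement) =====
-- stated objective: alternative
-- what changed: Each removal locates the first unmatched '}' with an indexed scan and joins three slices, instead of A's per-character accumulation into text_middle/text_back with a level flag carried past the break point.
import Mathlib
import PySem

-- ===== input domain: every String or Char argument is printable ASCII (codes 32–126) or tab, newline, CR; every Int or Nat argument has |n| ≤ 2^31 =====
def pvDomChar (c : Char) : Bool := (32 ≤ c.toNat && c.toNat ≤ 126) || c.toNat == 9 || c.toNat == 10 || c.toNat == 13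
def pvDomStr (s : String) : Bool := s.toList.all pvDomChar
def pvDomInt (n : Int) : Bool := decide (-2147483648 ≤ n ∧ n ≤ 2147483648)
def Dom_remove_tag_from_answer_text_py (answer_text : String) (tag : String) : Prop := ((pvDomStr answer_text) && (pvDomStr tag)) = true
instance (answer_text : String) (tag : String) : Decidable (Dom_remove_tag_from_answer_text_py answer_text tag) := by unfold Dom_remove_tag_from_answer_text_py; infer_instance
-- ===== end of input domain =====

-- B rebuilds each removal with an index scan + three slices instead of A's per-character
-- string accumulation; the return values agree on every input (both loops share the same
-- fuel bound; Python A never returns for tag = "", so nothing of A is claimed there).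

-- ===== PORT A =====
-- one iteration's inner for-loop: state (level, text_middle, text_back)
def pvA_step (acc : Int × List Char × List Char) (c : Char) : Int × List Char × List Char :=
  let level := acc.1
  let mid := acc.2.1
  let back := acc.2.2
  if level < 0 then (level, mid, back ++ [c])
  else
    let level' := if c = '{' then level + 1 else if c = '}' then level - 1 else level
    if 0 ≤ level' then (level', mid ++ [c], back) else (level', mid, back)

-- the while-loop; fuel makes it total (Python A diverges for tag = "" and never returns)
def pvA_loop : Nat → List Char → List Char → List Char
  | 0, s, _ => s
  | fuel + 1, s, tag =>
    if PySem.Chars.isIn tag s then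
      let index : Int := PySem.Chars.find s tag
      let text_begin := PySem.List.slice s none (some index)
      let text_temp := PySem.List.slice s (some (index + 6)) none
      let st := text_temp.foldl pvA_step (0, [], [])
      pvA_loop fuel (text_begin ++ st.2.1 ++ st.2.2) tag
    else s

def remove_tag_from_answer_text_py (answer_text : String) (tag : String) : String :=
  String.ofList (pvA_loop (answer_text.toList.length + 1) answer_text.toList tag.toList)

-- ===== PORT B =====
-- inner while-loop of Source B: index of the first '}' that drives level below 0
def pvB_scan : List Char → Int → Nat → Option Nat
  | [], _, _ => none
  | c :: cs, level, j =>
    if c = '{' then pvB_scan cs (level + 1) (j + 1)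
    else if c = '}' then
      if level - 1 < 0 then some j else pvB_scan cs (level - 1) (j + 1)
    else pvB_scan cs level (j + 1)

def pvB_loop : Nat → List Char → List Char → List Char
  | 0, s, _ => s
  | fuel + 1, s, tag =>
    let i : Int := PySem.Chars.find s tag
    if i < 0 then s
    else
      let rest := PySem.List.slice s (some (i + 6)) none
      match pvB_scan rest 0 0 with
      | some j =>
          pvB_loop fuel (PySem.List.slice s none (some i) ++
            PySem.List.slice rest none (some (j : Int)) ++
            PySem.List.slice rest (some ((j : Int) + 1)) none) tag
      | none => pvB_loop fuel (PySem.List.slice s none (some i) ++ rest) tag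

def remove_tag_from_answer_text_py_alt (answer_text : String) (tag : String) : String :=
  String.ofList (pvB_loop (answer_text.toList.length + 1) answer_text.toList tag.toList)

-- ===== PRECONDITION & SPEC =====
def Spec_remove_tag_from_answer_text_py (answer_text : String) (tag : String) (out : String) : Prop := out = remove_tag_from_answer_text_py_alt answer_text tag
instance (answer_text : String) (tag : String) (out : String) : Decidable (Spec_remove_tag_from_answer_text_py answer_text tag out) := by unfold Spec_remove_tag_from_answer_text_py; infer_instance

-- ===== CLAIM (what is proved, stated in full; the proofs are below) =====
def Claim_equal_remove_tag_from_answer_text_py : Prop := ∀ (answer_text : String) (tag : String), Dom_remove_tag_from_answer_text_py answer_text tag → Spec_remove_tag_from_answer_text_py answer_text tag (remove_tag_from_answer_text_py answer_text tag)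

-- ===== LEMMAS AND PROOFS =====

-- how pvA_step acts on each kind of character
lemma pvA_step_open (level : Int) (h : 0 ≤ level) (mid back : List Char) :
    pvA_step (level, mid, back) '{' = (level + 1, mid ++ ['{'], back) := by
  simp only [pvA_step]; split_ifs <;> simp_all <;> omega

lemma pvA_step_close_pos (level : Int) (h : 0 < level) (mid back : List Char) :
    pvA_step (level, mid, back) '}' = (level - 1, mid ++ ['}'], back) := by
  simp only [pvA_step]; split_ifs <;> simp_all <;> omega

lemma pvA_step_close_zero (mid back : List Char) :
    pvA_step (0, mid, back) '}' = (-1, mid, back) := by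
  simp only [pvA_step]; split_ifs <;> simp_all

lemma pvA_step_other (c : Char) (hb : c ≠ '{') (hc : c ≠ '}') (level : Int) (h : 0 ≤ level)
    (mid back : List Char) :
    pvA_step (level, mid, back) c = (level, mid ++ [c], back) := by
  simp only [pvA_step]; split_ifs <;> simp_all
  omega

-- once level is negative, the fold only appends to text_back
lemma pvA_fold_neg (cs : List Char) (level : Int) (h : level < 0) (mid back : List Char) :
    (cs.foldl pvA_step (level, mid, back)).2 = (mid, back ++ cs) := by
  induction cs generalizing back with
  | nil => simp
  | cons c cs ih =>
    simp only [List.foldl_cons, pvA_step, if_pos h]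
    rw [ih (back ++ [c])]
    simp

-- offset normalisation for pvB_scan's index counter
lemma pvB_scan_shift (cs : List Char) (level : Int) (j : Nat) :
    pvB_scan cs level j = (pvB_scan cs level 0).map (· + j) := by
  induction cs generalizing level j with
  | nil => simp [pvB_scan]
  | cons c cs ih =>
    simp only [pvB_scan]
    split_ifs with h1 h2 h3
    · rw [ih _ (j+1), ih _ 1, Option.map_map]
      congr 1; funext k; simp; omega
    · simp
    · rw [ih _ (j+1), ih _ 1, Option.map_map]
      congr 1; funext k; simp; omega
    · rw [ih _ (j+1), ih _ 1, Option.map_map]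
      congr 1; funext k; simp; omega

-- the fold's (middle, back) is the scan-and-slice split
lemma pvA_fold_eq_scan (cs : List Char) (level : Int) (h : 0 ≤ level) (mid back : List Char) :
    (cs.foldl pvA_step (level, mid, back)).2 =
      match pvB_scan cs level 0 with
      | some j => (mid ++ cs.take j, back ++ cs.drop (j + 1))
      | none => (mid ++ cs, back) := by
  induction cs generalizing level mid with
  | nil => simp [pvB_scan]
  | cons c cs ih =>
    by_cases hb : c = '{'
    · subst hb
      have : pvB_scan ('{' :: cs) level 0 = (pvB_scan cs (level + 1) 0).map (· + 1) := by
        simp [pvB_scan, pvB_scan_shift cs (level + 1) 1]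
      rw [this]
      rw [List.foldl_cons, pvA_step_open level h]
      rw [ih (level + 1) (by omega) (mid ++ ['{'])]
      cases hc : pvB_scan cs (level + 1) 0 <;> simp
    · by_cases hc : c = '}'
      · subst hc
        by_cases hz : level = 0
        · subst hz
          have hs : pvB_scan ('}' :: cs) 0 0 = some 0 := by
            simp [pvB_scan]
          rw [hs]
          rw [List.foldl_cons, pvA_step_close_zero]
          rw [pvA_fold_neg cs (-1) (by omega) mid back]
          simp
        · have : pvB_scan ('}' :: cs) level 0 = (pvB_scan cs (level - 1) 0).map (· + 1) := by
            simp only [pvB_scan, if_true]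
            rw [if_neg (by omega : ¬ level - 1 < 0)]
            exact pvB_scan_shift cs (level - 1) 1
          rw [this]
          rw [List.foldl_cons, pvA_step_close_pos level (by omega)]
          rw [ih (level - 1) (by omega) (mid ++ ['}'])]
          cases hd : pvB_scan cs (level - 1) 0 <;> simp
      · have : pvB_scan (c :: cs) level 0 = (pvB_scan cs level 0).map (· + 1) := by
          simp only [pvB_scan]
          rw [if_neg (by simp [hb]), if_neg (by simp [hc])]
          exact pvB_scan_shift cs level 1
        rw [this]
        rw [List.foldl_cons, pvA_step_other c hb hc level h]
        rw [ih level h (mid ++ [c])]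
        cases hd : pvB_scan cs level 0 <;> simp

-- the two loops compute the same string at equal fuel
lemma pvLoop_eq (fuel : Nat) (s tag : List Char) :
    pvA_loop fuel s tag = pvB_loop fuel s tag := by
  induction fuel generalizing s with
  | zero => rfl
  | succ fuel ih =>
    simp only [pvA_loop, pvB_loop]
    by_cases hin : PySem.Chars.isIn tag s = true
    · have hf : 0 ≤ PySem.Chars.find s tag := by
        rw [PySem.Chars.find_nonneg_iff]
        exact (PySem.Chars.isIn_iff_infix tag s).1 hin
      rw [if_pos hin, if_neg (by omega)]
      have hstep := pvA_fold_eq_scan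
        (PySem.List.slice s (some (PySem.Chars.find s tag + 6)) none) 0 (by omega) [] []
      cases hscan : pvB_scan (PySem.List.slice s (some (PySem.Chars.find s tag + 6)) none) 0 0 with
      | some j =>
        rw [hscan] at hstep
        rw [ih]
        congr 1
        have h1 : (Prod.snd (List.foldl pvA_step (0, ([] : List Char), ([] : List Char))
            (PySem.List.slice s (some (PySem.Chars.find s tag + 6)) none))).1
            = (PySem.List.slice s (some (PySem.Chars.find s tag + 6)) none).take j := by
          rw [hstep]; simp
        have h2 : (Prod.snd (List.foldl pvA_step (0, ([] : List Char), ([] : List Char))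
            (PySem.List.slice s (some (PySem.Chars.find s tag + 6)) none))).2
            = (PySem.List.slice s (some (PySem.Chars.find s tag + 6)) none).drop (j + 1) := by
          rw [hstep]; simp
        rw [h1, h2]
        rw [PySem.List.slice_to_natCast]
        have : (j : Int) + 1 = ((j + 1 : Nat) : Int) := by push_cast; ring
        rw [this, PySem.List.slice_from_natCast]
      | none =>
        rw [hscan] at hstep
        rw [ih]
        congr 1
        have h1 : Prod.snd (List.foldl pvA_step (0, ([] : List Char), ([] : List Char))
            (PySem.List.slice s (some (PySem.Chars.find s tag + 6)) none))
            = (PySem.List.slice s (some (PySem.Chars.find s tag + 6)) none, []) := by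
          rw [hstep]; simp
        rw [h1]
        simp
    · have hne : PySem.Chars.find s tag = -1 := by
        rw [PySem.Chars.find_eq_neg_one_iff, ← PySem.Chars.isIn_iff_infix]
        simpa using hin
      rw [if_neg hin, if_pos (by rw [hne]; norm_num)]

-- ===== VERDICT (by name: the statement is the Claim_ definition above) =====
theorem remove_tag_from_answer_text_py_spec : Claim_equal_remove_tag_from_answer_text_py := by
  intro answer_text tag _
  unfold Spec_remove_tag_from_answer_text_py remove_tag_from_answer_text_py remove_tag_from_answer_text_py_alt
  rw [pvLoop_eq]
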